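-- pv_equiv track=rewrite | github.com/serggude/CARAPKIN_PRAKT | Практика_4/PT_2/Задание_2.py | homework_advanced
-- ===== SOURCE A (Python) =====
-- def homework_advanced(image_pixels, filter_size, iterations):
--     height = len(image_pixels)
--     width = len(image_pixels[0])
--     radius = filter_size // 2
--
--     current = [row[:] for row in image_pixels]
--
--     for _ in range(iterations):
--         next_image = [row[:] for row in current]
--
--         for i in range(radius, height - radius):
--             for j in range(radius, width - radius):
--                 neighborhood = []
--
--                 for di in range(-radius, radius + 1):
--                     for dj in range(-radius, radius + 1):
--                         neighborhood.append(current[i + di][j + dj])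
--
--                 neighborhood.sort()
--                 next_image[i][j] = neighborhood[len(neighborhood) // 2]
--
--         current = next_image
--
--     return current
-- ===== SOURCE B (Python) =====
-- def homework_advanced(image_pixels, filter_size, iterations):
--     height = len(image_pixels)
--     width = len(image_pixels[0])
--     radius = filter_size // 2
--
--     def median_at(img, i, j):
--         values = [img[i + di][j + dj]
--                   for di in range(-radius, radius + 1)
--                   for dj in range(-radius, radius + 1)]
--         k = len(values) // 2
--         for v in values:
--             below = 0
--             not_above = 0
--             for x in values:
--                 if x < v:
--                     below += 1
--                 if x <= v:
--                     not_above += 1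
--             if below <= k < not_above:
--                 return v
--
--     current = [list(row) for row in image_pixels]
--     for _ in range(iterations):
--         current = [[median_at(current, i, j)
--                     if radius <= i < height - radius and radius <= j < width - radius
--                     else x
--                     for j, x in enumerate(row)]
--                    for i, row in enumerate(current)]
--     return current
-- ===== Notes on version B (the rewrite author's own statement) =====
-- stated objective: alternative
-- what changed: Each output pixel's median is obtained by rank counting (the unique value v with count(<v) <= k < count(<=v)) instead of sorting the neighborhood and indexing its middle, and each iteration rebuilds the image as a comprehension over enumerated rows instead of mutating a copied image in place.
import Mathlib
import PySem

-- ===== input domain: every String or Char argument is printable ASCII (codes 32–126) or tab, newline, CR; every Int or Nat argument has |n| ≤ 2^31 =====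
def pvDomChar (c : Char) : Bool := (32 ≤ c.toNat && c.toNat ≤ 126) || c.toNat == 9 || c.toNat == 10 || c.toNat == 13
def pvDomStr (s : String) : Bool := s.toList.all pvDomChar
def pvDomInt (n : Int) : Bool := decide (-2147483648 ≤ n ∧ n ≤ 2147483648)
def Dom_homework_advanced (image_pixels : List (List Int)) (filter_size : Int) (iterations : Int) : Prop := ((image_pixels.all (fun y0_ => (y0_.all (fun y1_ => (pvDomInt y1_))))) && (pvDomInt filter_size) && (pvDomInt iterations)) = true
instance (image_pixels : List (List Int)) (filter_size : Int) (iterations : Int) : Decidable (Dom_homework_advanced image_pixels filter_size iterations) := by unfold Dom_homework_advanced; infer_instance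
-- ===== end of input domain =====

-- B computes each median by rank counting over the neighborhood instead of sorting it and
-- indexing the middle, and rebuilds each iteration's image as a map over enumerated rows
-- instead of writing into a mutated copy (objective: alternative algorithm, same results).

-- ===== PORT A =====
-- next_image[i][j] = v  (row i is read, updated at j, written back)
def pvASet2 (m : List (List Int)) (i j : Int) (v : Int) : List (List Int) :=
  PySem.List.pySetD m i (PySem.List.pySetD (PySem.List.pyGetD m i []) j v)

-- the nested di/dj loops appending current[i+di][j+dj]
def pvANbhd (current : List (List Int)) (r i j : Int) : List Int :=
  (PySem.List.pyRange (-r) (r + 1) 1).foldl (fun nb di =>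
    (PySem.List.pyRange (-r) (r + 1) 1).foldl (fun nb2 dj =>
      nb2 ++ [PySem.List.pyGetD (PySem.List.pyGetD current (i + di) []) (j + dj) 0]) nb) []

-- one pass of the two nested i/j loops writing into next_image (initially a copy of current)
def pvAStep (r h w : Int) (current : List (List Int)) : List (List Int) :=
  (PySem.List.pyRange r (h - r) 1).foldl (fun nx i =>
    (PySem.List.pyRange r (w - r) 1).foldl (fun nx2 j =>
      let nb := PySem.List.sorted (pvANbhd current r i j) (fun x => x) false
      pvASet2 nx2 i j (PySem.List.pyGetD nb (PySem.Int.floordiv (nb.length : Int) 2) 0)) nx) current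

def homework_advanced (image_pixels : List (List Int)) (filter_size : Int) (iterations : Int) : List (List Int) :=
  let height : Int := image_pixels.length
  let width : Int := (PySem.List.pyGetD image_pixels 0 []).length
  let radius : Int := PySem.Int.floordiv filter_size 2
  (PySem.List.pyRange 0 iterations 1).foldl (fun current _ => pvAStep radius height width current) image_pixels

-- ===== PORT B =====
-- median_at: rank-counting selection of the middle order statistic (no sort)
def pvBMedianAt (r : Int) (img : List (List Int)) (i j : Int) : Int :=
  let values := (PySem.List.pyRange (-r) (r + 1) 1).flatMap (fun di =>
    (PySem.List.pyRange (-r) (r + 1) 1).map (fun dj =>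
      PySem.List.pyGetD (PySem.List.pyGetD img (i + di) []) (j + dj) 0))
  let k : Int := PySem.Int.floordiv (values.length : Int) 2
  (values.find? (fun v =>
      let below := values.foldl (fun acc x => if x < v then acc + 1 else acc) (0 : Int)
      let notAbove := values.foldl (fun acc x => if x ≤ v then acc + 1 else acc) (0 : Int)
      decide (below ≤ k ∧ k < notAbove))).getD 0

-- one iteration: comprehension over enumerated rows/pixels
def pvBStep (r h w : Int) (current : List (List Int)) : List (List Int) :=
  (PySem.List.enumerate current 0).map (fun p =>
    (PySem.List.enumerate p.2 0).map (fun q =>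
      if r ≤ p.1 ∧ p.1 < h - r ∧ r ≤ q.1 ∧ q.1 < w - r then pvBMedianAt r current p.1 q.1 else q.2))

def homework_advanced_alt (image_pixels : List (List Int)) (filter_size : Int) (iterations : Int) : List (List Int) :=
  let height : Int := image_pixels.length
  let width : Int := (PySem.List.pyGetD image_pixels 0 []).length
  let radius : Int := PySem.Int.floordiv filter_size 2
  (PySem.List.pyRange 0 iterations 1).foldl (fun current _ => pvBStep radius height width current) image_pixels

-- ===== PRECONDITION & SPEC =====
-- Pre_ excludes exactly the inputs on which A raises: an empty image (image_pixels[0] is an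
-- IndexError), a negative filter_size with a positive iteration count (the neighborhood list is
-- empty and neighborhood[0] raises), and images whose filter window is non-degenerate but where
-- some row is shorter than the first row (current[i+di][j+dj] raises IndexError).
def Pre_homework_advanced (image_pixels : List (List Int)) (filter_size : Int) (iterations : Int) : Prop :=
  image_pixels ≠ [] ∧
  (0 < iterations →
    0 ≤ filter_size ∧
    (2 * PySem.Int.floordiv filter_size 2 < (image_pixels.length : Int) →
     2 * PySem.Int.floordiv filter_size 2 < ((image_pixels.headD []).length : Int) →
     ∀ row ∈ image_pixels, (image_pixels.headD []).length ≤ row.length))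
instance (image_pixels : List (List Int)) (filter_size : Int) (iterations : Int) : Decidable (Pre_homework_advanced image_pixels filter_size iterations) := by unfold Pre_homework_advanced; infer_instance

def pvWitness_homework_advanced : List (List Int) × Int × Int := ([[9, 2, 3], [4, 5, 6], [7, 8, 1]], 3, 2)

def Spec_homework_advanced (image_pixels : List (List Int)) (filter_size : Int) (iterations : Int) (out : List (List Int)) : Prop := out = homework_advanced_alt image_pixels filter_size iterations
instance (image_pixels : List (List Int)) (filter_size : Int) (iterations : Int) (out : List (List Int)) : Decidable (Spec_homework_advanced image_pixels filter_size iterations out) := by unfold Spec_homework_advanced; infer_instance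

-- ===== CLAIM (what is proved, stated in full; the proofs are below) =====
def Claim_equal_homework_advanced : Prop := ∀ (image_pixels : List (List Int)) (filter_size : Int) (iterations : Int), Dom_homework_advanced image_pixels filter_size iterations → Pre_homework_advanced image_pixels filter_size iterations → Spec_homework_advanced image_pixels filter_size iterations (homework_advanced image_pixels filter_size iterations)

-- ===== LEMMAS AND PROOFS =====

theorem pv_pySetD_oob {α : Type} (m : List α) (i : Int) (hi : 0 ≤ i)
    (h : m.length ≤ i.toNat) (v : α) : PySem.List.pySetD m i v = m := by
  rw [PySem.List.pySetD_of_nonneg m v hi, List.set_eq_of_length_le h]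

theorem pv_pyGetD_pySetD_self {α : Type} (m : List α) (i : Int) (x d : α) (hi : 0 ≤ i)
    (h : i.toNat < m.length) :
    PySem.List.pyGetD (PySem.List.pySetD m i x) i d = x := by
  rw [PySem.List.pySetD_of_nonneg m x hi,
      PySem.List.pyGetD_eq_getElem _ d hi (by simp only [List.length_set]; omega)]
  exact List.getElem_set_self _

theorem pv_pySetD_pySetD {α : Type} (m : List α) (i : Int) (x y : α) (hi : 0 ≤ i) :
    PySem.List.pySetD (PySem.List.pySetD m i x) i y = PySem.List.pySetD m i y := by
  rw [PySem.List.pySetD_of_nonneg m x hi, PySem.List.pySetD_of_nonneg _ y hi,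
      PySem.List.pySetD_of_nonneg m y hi, List.set_set]

theorem pv_pySetD_getD_self {α : Type} (m : List α) (i : Int) (d : α) (hi : 0 ≤ i)
    (h : i.toNat < m.length) :
    PySem.List.pySetD m i (PySem.List.pyGetD m i d) = m := by
  rw [PySem.List.pyGetD_eq_getElem m d hi (by omega),
      PySem.List.pySetD_of_nonneg m _ hi, List.set_getElem_self]

theorem pv_samefold {α : Type} (d : α) (w : Int → α → α) (i : Int) (hi : 0 ≤ i) :
    ∀ (js : List Int) (m : List α),
      js.foldl (fun acc j => PySem.List.pySetD acc i (w j (PySem.List.pyGetD acc i d))) m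
        = PySem.List.pySetD m i (js.foldl (fun row j => w j row) (PySem.List.pyGetD m i d)) := by
  intro js
  induction js with
  | nil =>
      intro m
      by_cases h : i.toNat < m.length
      · rw [List.foldl_nil, List.foldl_nil, pv_pySetD_getD_self m i d hi h]
      · rw [List.foldl_nil, List.foldl_nil, pv_pySetD_oob m i hi (by omega)]
  | cons j js ih =>
      intro m
      rw [List.foldl_cons, List.foldl_cons, ih]
      by_cases h : i.toNat < m.length
      · rw [pv_pyGetD_pySetD_self m i _ d hi h, pv_pySetD_pySetD m i _ _ hi]
      · rw [pv_pySetD_oob m i hi (by omega), pv_pySetD_oob m i hi (by omega),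
            pv_pySetD_oob m i hi (by omega)]

theorem pv_setfold_get_aux {α : Type} (d : α) (u : Int → α → α) :
    ∀ (n : Nat) (a b : Int), 0 ≤ a → (b - a).toNat ≤ n →
      ∀ (m : List α) (t : Nat), t < m.length →
      ((PySem.List.pyRange a b 1).foldl
          (fun acc i => PySem.List.pySetD acc i (u i (PySem.List.pyGetD acc i d))) m)[t]?
        = if a ≤ (t : Int) ∧ (t : Int) < b then m[t]?.map (u t) else m[t]? := by
  intro n
  induction n with
  | zero =>
      intro a b ha hn m t ht
      rw [PySem.List.pyRange_one_eq_nil (by omega : b ≤ a), List.foldl_nil,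
          if_neg (by omega)]
  | succ n ih =>
      intro a b ha hn m t ht
      by_cases hab : a < b
      · rw [PySem.List.pyRange_one_cons hab, List.foldl_cons]
        have hlen : (PySem.List.pySetD m a (u a (PySem.List.pyGetD m a d))).length = m.length :=
          PySem.List.length_pySetD m a _
        have hsd : ∀ v, PySem.List.pySetD m a v = m.set a.toNat v :=
          fun v => PySem.List.pySetD_of_nonneg m v ha
        rw [ih (a + 1) b (by omega) (by omega) _ t (by omega)]
        by_cases hta : (t : Int) = a
        · have htn : t = a.toNat := by omega
          rw [if_neg (by omega), if_pos (by constructor <;> omega)]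
          rw [hsd, htn, List.getElem?_set_self (by omega),
              List.getElem?_eq_getElem (show a.toNat < m.length by omega), Option.map_some,
              PySem.List.pyGetD_eq_getElem m d ha (by omega),
              show ((a.toNat : Int)) = a from by omega]
        · have htn : a.toNat ≠ t := by omega
          have hset? : (PySem.List.pySetD m a (u a (PySem.List.pyGetD m a d)))[t]? = m[t]? := by
            rw [hsd, List.getElem?_set_ne htn]
          rw [hset?]
          by_cases hc : a + 1 ≤ (t : Int) ∧ (t : Int) < b
          · rw [if_pos hc, if_pos (by omega)]
          · rw [if_neg hc, if_neg (by omega)]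
      · rw [PySem.List.pyRange_one_eq_nil (by omega : b ≤ a), List.foldl_nil,
            if_neg (by omega)]

theorem pv_setfold_get {α : Type} (d : α) (u : Int → α → α) (a b : Int) (ha : 0 ≤ a)
    (m : List α) (t : Nat) (ht : t < m.length) :
    ((PySem.List.pyRange a b 1).foldl
        (fun acc i => PySem.List.pySetD acc i (u i (PySem.List.pyGetD acc i d))) m)[t]?
      = if a ≤ (t : Int) ∧ (t : Int) < b then m[t]?.map (u t) else m[t]? :=
  pv_setfold_get_aux d u (b - a).toNat a b ha le_rfl m t ht

theorem pv_setfold_len {α : Type} (d : α) (u : Int → α → α) :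
    ∀ (js : List Int) (m : List α),
      (js.foldl (fun acc i => PySem.List.pySetD acc i (u i (PySem.List.pyGetD acc i d))) m).length
        = m.length := by
  intro js
  induction js with
  | nil => intro m; rfl
  | cons j js ih => intro m; rw [List.foldl_cons, ih, PySem.List.length_pySetD]

theorem pv_median_count (l : List Int) (hne : l ≠ []) :
    (l.find? (fun v =>
        decide ((0 + (l.countP (fun x => decide (x < v)) : Int)) ≤ PySem.Int.floordiv (l.length : Int) 2 ∧
                PySem.Int.floordiv (l.length : Int) 2 < 0 + (l.countP (fun x => decide (x ≤ v)) : Int)))).getD 0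
      = PySem.List.pyGetD (PySem.List.sorted l (fun x => x) false)
          (PySem.Int.floordiv ((PySem.List.sorted l (fun x => x) false).length : Int) 2) 0 := by
  have hN : 0 < l.length := List.length_pos_of_ne_nil hne
  have hslen : (PySem.List.sorted l (fun x => x) false).length = l.length :=
    PySem.List.length_sorted l _ _
  have hkN : l.length / 2 < l.length := Nat.div_lt_self hN (by omega)
  have hkI : PySem.Int.floordiv (l.length : Int) 2 = ((l.length / 2 : Nat) : Int) := by
    rw [PySem.Int.floordiv_eq_ediv_of_pos (by omega : (0:Int) < 2)]
    omega
  set s := PySem.List.sorted l (fun x => x) false with hs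
  set kN : Nat := l.length / 2 with hk
  have hkNs : kN < s.length := by omega
  set m := s[kN]'hkNs with hmdef
  have hm : m ∈ l := (PySem.List.mem_sorted l _ _ m).1 (List.getElem_mem hkNs)
  have hperm : s.Perm l := PySem.List.sorted_perm l _ _
  -- count of elements strictly below the middle element
  have hc1 : l.countP (fun x => decide (x < m)) ≤ kN := by
    rw [← hperm.countP_eq]
    conv_lhs => rw [← List.take_append_drop kN s]
    rw [List.countP_append]
    have h2 : (s.drop kN).countP (fun x => decide (x < m)) = 0 := by
      rw [List.countP_eq_zero]
      intro x hx
      obtain ⟨t, ht, hxe⟩ := List.mem_iff_getElem.1 hx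
      have ht' : kN + t < s.length := by rw [List.length_drop] at ht; omega
      have : s[kN] ≤ (s.drop kN)[t] := by
        rw [List.getElem_drop]
        exact PySem.List.sorted_id_getElem_mono l (Nat.le_add_right kN t) (by rw [← hs]; omega)
      rw [hxe] at this
      simp only [decide_eq_true_eq]
      omega
    have h1 : (s.take kN).countP (fun x => decide (x < m)) ≤ kN :=
      le_trans List.countP_le_length (by rw [List.length_take]; omega)
    omega
  -- count of elements not above the middle element
  have hc2 : kN < l.countP (fun x => decide (x ≤ m)) := by
    rw [← hperm.countP_eq]
    conv_rhs => rw [← List.take_append_drop (kN + 1) s]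
    rw [List.countP_append]
    have h1 : (s.take (kN + 1)).countP (fun x => decide (x ≤ m)) = kN + 1 := by
      have hall : ∀ x ∈ s.take (kN + 1), (fun x => decide (x ≤ m)) x = true := by
        intro x hx
        obtain ⟨t, ht, hxe⟩ := List.mem_iff_getElem.1 hx
        have htl : t < kN + 1 := by
          have := List.length_take_le (kN + 1) s
          omega
        have : (s.take (kN + 1))[t] ≤ s[kN] := by
          rw [List.getElem_take]
          exact PySem.List.sorted_id_getElem_mono l (by omega) (by rw [← hs]; omega)
        rw [hxe] at this
        simp only [decide_eq_true_eq]
        omega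
      rw [List.countP_eq_length.2 hall, List.length_take]
      omega
    omega
  -- the counting test characterises the middle element
  have hchar : ∀ v : Int,
      (l.countP (fun x => decide (x < v)) ≤ kN ∧ kN < l.countP (fun x => decide (x ≤ v))) ↔ v = m := by
    intro v
    constructor
    · rintro ⟨h1, h2⟩
      by_contra hvm
      rcases lt_or_gt_of_ne hvm with hlt | hgt
      · have hmono : l.countP (fun x => decide (x ≤ v)) ≤ l.countP (fun x => decide (x < m)) := by
          apply List.countP_mono_left
          intro x _ hx
          simp only [decide_eq_true_eq] at hx ⊢
          omega
        omega
      · have hmono : l.countP (fun x => decide (x ≤ m)) ≤ l.countP (fun x => decide (x < v)) := by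
          apply List.countP_mono_left
          intro x _ hx
          simp only [decide_eq_true_eq] at hx ⊢
          omega
        omega
    · rintro rfl
      exact ⟨hc1, hc2⟩
  -- the find? predicate is the test "v = m"
  have hpred : (fun v =>
        decide ((0 + (l.countP (fun x => decide (x < v)) : Int)) ≤ PySem.Int.floordiv (l.length : Int) 2 ∧
                PySem.Int.floordiv (l.length : Int) 2 < 0 + (l.countP (fun x => decide (x ≤ v)) : Int)))
      = (fun v : Int => decide (v = m)) := by
    funext v
    rw [decide_eq_decide, hkI]
    rw [← hchar v]
    constructor <;> (rintro ⟨h1, h2⟩; constructor <;> omega)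
  rw [hpred]
  have hsome : (l.find? (fun v : Int => decide (v = m))).isSome :=
    List.find?_isSome.2 ⟨m, hm, by simp⟩
  obtain ⟨v, hv⟩ := Option.isSome_iff_exists.1 hsome
  have hvm : v = m := by
    have := List.find?_some hv
    simpa using this
  have hfd : PySem.Int.floordiv ((s.length : Nat) : Int) 2 = (kN : Int) := by
    rw [hslen]; exact hkI
  rw [hv, Option.getD_some, hvm, hfd,
      PySem.List.pyGetD_eq_getElem s 0 (by omega) (by omega)]
  rw [hmdef]
  simp

def pvAVal (cur : List (List Int)) (r i j : Int) : Int :=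
  let nb := PySem.List.sorted (pvANbhd cur r i j) (fun x => x) false
  PySem.List.pyGetD nb (PySem.Int.floordiv (nb.length : Int) 2) 0

def pvAU (cur : List (List Int)) (r w i : Int) (row : List Int) : List Int :=
  (PySem.List.pyRange r (w - r) 1).foldl
    (fun row2 j => PySem.List.pySetD row2 j (pvAVal cur r i j)) row

theorem pv_astep_collapse (r h w : Int) (hr : 0 ≤ r) (cur : List (List Int)) :
    pvAStep r h w cur
      = (PySem.List.pyRange r (h - r) 1).foldl
          (fun nx i => PySem.List.pySetD nx i (pvAU cur r w i (PySem.List.pyGetD nx i []))) cur := by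
  unfold pvAStep
  apply PySem.List.foldl_congr_mem
  intro acc i hmem
  have hi : 0 ≤ i := by
    have := PySem.List.mem_pyRange_one.1 hmem
    omega
  exact pv_samefold [] (fun j row => PySem.List.pySetD row j (pvAVal cur r i j)) i hi
    (PySem.List.pyRange r (w - r) 1) acc

theorem pv_nbhd_eq (cur : List (List Int)) (r i j : Int) :
    pvANbhd cur r i j
      = (PySem.List.pyRange (-r) (r + 1) 1).flatMap (fun di =>
          (PySem.List.pyRange (-r) (r + 1) 1).map (fun dj =>
            PySem.List.pyGetD (PySem.List.pyGetD cur (i + di) []) (j + dj) 0)) := by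
  unfold pvANbhd
  simp only [PySem.List.foldl_append_singleton_eq_map, PySem.List.foldl_append_eq_flatMap,
    List.nil_append]

theorem pv_values_ne_nil (cur : List (List Int)) (r i j : Int) (hr : 0 ≤ r) :
    (PySem.List.pyRange (-r) (r + 1) 1).flatMap (fun di =>
        (PySem.List.pyRange (-r) (r + 1) 1).map (fun dj =>
          PySem.List.pyGetD (PySem.List.pyGetD cur (i + di) []) (j + dj) 0)) ≠ [] := by
  intro hcontra
  rw [List.flatMap_eq_nil_iff] at hcontra
  have hmem : -r ∈ PySem.List.pyRange (-r) (r + 1) 1 := PySem.List.mem_pyRange_one.2 (by omega)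
  have := hcontra _ hmem
  rw [List.map_eq_nil_iff] at this
  rw [this] at hmem
  exact List.not_mem_nil hmem




theorem pv_val_eq (cur : List (List Int)) (r i j : Int) (hr : 0 ≤ r) :
    pvAVal cur r i j = pvBMedianAt r cur i j := by
  unfold pvAVal pvBMedianAt
  rw [pv_nbhd_eq]
  simp only [PySem.List.foldl_ite_add_one]
  exact (pv_median_count _ (pv_values_ne_nil cur r i j hr)).symm

theorem pv_astep_get (r h w : Int) (hr : 0 ≤ r) (cur : List (List Int)) (n : Nat)
    (hn : n < cur.length) :
    (pvAStep r h w cur)[n]?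
      = if r ≤ (n : Int) ∧ (n : Int) < h - r
        then cur[n]?.map (pvAU cur r w n) else cur[n]? := by
  rw [pv_astep_collapse r h w hr cur]
  exact pv_setfold_get [] (fun i row => pvAU cur r w i row) r (h - r) hr cur n hn

theorem pv_astep_len (r h w : Int) (hr : 0 ≤ r) (cur : List (List Int)) :
    (pvAStep r h w cur).length = cur.length := by
  rw [pv_astep_collapse r h w hr cur]
  exact pv_setfold_len [] (fun i row => pvAU cur r w i row) _ cur

theorem pv_au_get (cur : List (List Int)) (r w i : Int) (hr : 0 ≤ r) (row : List Int)
    (s : Nat) (hs : s < row.length) :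
    (pvAU cur r w i row)[s]?
      = if r ≤ (s : Int) ∧ (s : Int) < w - r
        then row[s]?.map (fun _ => pvAVal cur r i s) else row[s]? :=
  pv_setfold_get 0 (fun j _ => pvAVal cur r i j) r (w - r) hr row s hs

theorem pv_au_len (cur : List (List Int)) (r w i : Int) (row : List Int) :
    (pvAU cur r w i row).length = row.length :=
  pv_setfold_len 0 (fun j _ => pvAVal cur r i j) _ row

theorem pv_bstep_len (r h w : Int) (cur : List (List Int)) :
    (pvBStep r h w cur).length = cur.length := by
  unfold pvBStep
  rw [List.length_map, PySem.List.length_enumerate]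

theorem pv_step_eq (r h w : Int) (hr : 0 ≤ r) (cur : List (List Int)) :
    pvAStep r h w cur = pvBStep r h w cur := by
  apply List.ext_getElem?
  intro n
  by_cases hn : n < cur.length
  · rw [pv_astep_get r h w hr cur n hn, List.getElem?_eq_getElem hn]
    unfold pvBStep
    rw [List.getElem?_map, PySem.List.getElem?_enumerate, List.getElem?_eq_getElem hn]
    simp only [Option.map_some, zero_add]
    by_cases hcond : r ≤ (n : Int) ∧ (n : Int) < h - r
    · rw [if_pos hcond]
      congr 1
      apply List.ext_getElem?
      intro s
      by_cases hs : s < cur[n].length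
      · rw [pv_au_get cur r w n hr cur[n] s hs, List.getElem?_eq_getElem hs,
            List.getElem?_map, PySem.List.getElem?_enumerate, List.getElem?_eq_getElem hs]
        simp only [Option.map_some, zero_add]
        by_cases hjc : r ≤ (s : Int) ∧ (s : Int) < w - r
        · rw [if_pos hjc, if_pos ⟨hcond.1, hcond.2, hjc.1, hjc.2⟩]
          rw [pv_val_eq cur r n s hr]
        · rw [if_neg hjc, if_neg (fun hc => hjc ⟨hc.2.2.1, hc.2.2.2⟩)]
      · rw [List.getElem?_eq_none (by rw [pv_au_len]; omega),
            List.getElem?_eq_none (by rw [List.length_map, PySem.List.length_enumerate]; omega)]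
    · rw [if_neg hcond]
      congr 1
      symm
      calc (PySem.List.enumerate cur[n] 0).map (fun q =>
              if r ≤ (n : Int) ∧ (n : Int) < h - r ∧ r ≤ q.1 ∧ q.1 < w - r
              then pvBMedianAt r cur n q.1 else q.2)
          = (PySem.List.enumerate cur[n] 0).map (fun q => q.2) := by
            apply List.map_congr_left
            intro q _
            exact if_neg (fun hc => hcond ⟨hc.1, hc.2.1⟩)
        _ = cur[n] := PySem.List.map_snd_enumerate cur[n] 0
  · rw [List.getElem?_eq_none (by rw [pv_astep_len r h w hr cur]; omega),
        List.getElem?_eq_none (by rw [pv_bstep_len]; omega)]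

-- ===== VERDICT (by name: the statement is the Claim_ definition above) =====
theorem homework_advanced_spec : Claim_equal_homework_advanced := by
  intro image_pixels filter_size iterations _hdom hpre
  unfold Spec_homework_advanced homework_advanced homework_advanced_alt
  by_cases hit : 0 < iterations
  · have hfs : 0 ≤ filter_size := (hpre.2 hit).1
    have hr : 0 ≤ PySem.Int.floordiv filter_size 2 := by
      rw [PySem.Int.floordiv_eq_ediv_of_pos (by omega : (0:Int) < 2)]
      exact Int.ediv_nonneg hfs (by omega)
    have hstep : (fun (c : List (List Int)) (_ : Int) =>
        pvAStep (PySem.Int.floordiv filter_size 2) (image_pixels.length : Int)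
          ((PySem.List.pyGetD image_pixels 0 []).length : Int) c)
        = (fun (c : List (List Int)) (_ : Int) =>
        pvBStep (PySem.Int.floordiv filter_size 2) (image_pixels.length : Int)
          ((PySem.List.pyGetD image_pixels 0 []).length : Int) c) := by
      funext c _
      exact pv_step_eq _ _ _ hr c
    simp only [hstep]
  · rw [PySem.List.pyRange_one_eq_nil (by omega : iterations ≤ (0:Int))]
    rfl
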